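-- pv_equiv track=rewrite | github.com/xraySMULu/smu-uac | website/util.py | sort_lst_by_char1
-- ===== SOURCE A (Python) =====
-- def sort_lst_by_char1(lst):
--     lst_rtn = []
--     # Define the desired order
--     desired_order = ['A', 'B', 'C', 'D', 'E', 'F']
--
--     # Filter and sort the ops based on the desired order
--     opts1 = sorted(
--         [op for op in lst if op[:1] in desired_order],
--         key=lambda x: desired_order.index(x[:1])
--     )
--
--     if len(opts1) == 6:
--         lst_rtn = opts1
--
--     return lst_rtn
-- ===== SOURCE B (Python) =====
-- def sort_lst_by_char1(lst):
--     # Bucket pass: walk the priority chars in order, collecting matching ops;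
--     # stable within each bucket because lst is scanned in original order.
--     out = []
--     for c in "ABCDEF":
--         for op in lst:
--             if op[:1] == c:
--                 out.append(op)
--     return out if len(out) == 6 else []
-- ===== Notes on version B (the rewrite author's own statement) =====
-- stated objective: alternative
-- what changed: Replaced the list-comprehension filter plus key-based comparison sort with a bucketing pass: iterate the six priority characters in order and collect matching elements by a scan of the original list, which reproduces the stable sorted order without any sort.
import Mathlib
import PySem

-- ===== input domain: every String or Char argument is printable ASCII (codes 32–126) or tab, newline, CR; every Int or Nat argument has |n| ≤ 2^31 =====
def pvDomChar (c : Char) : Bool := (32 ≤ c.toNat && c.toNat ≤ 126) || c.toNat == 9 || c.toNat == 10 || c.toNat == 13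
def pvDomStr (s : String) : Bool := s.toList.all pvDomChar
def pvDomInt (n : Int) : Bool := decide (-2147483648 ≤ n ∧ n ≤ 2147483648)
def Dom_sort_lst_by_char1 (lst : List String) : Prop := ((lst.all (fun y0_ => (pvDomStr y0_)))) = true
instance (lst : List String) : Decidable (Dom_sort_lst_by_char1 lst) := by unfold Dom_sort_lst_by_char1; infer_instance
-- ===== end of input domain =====

-- B replaces A's filter + key-comparison sort by a bucketing pass over the six priority
-- characters (alternative decomposition, no sort); proved to return the same list.


-- op[:1] as a list of characters (Python one-character string, or '' for an empty op)
def pvHead1 (x : String) : List Char := PySem.List.slice x.toList none (some 1)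

-- ===== PORT A =====
-- the Python literal ['A', 'B', 'C', 'D', 'E', 'F'] (strings as char lists)
def desired_order : List (List Char) := [['A'], ['B'], ['C'], ['D'], ['E'], ['F']]

-- key = desired_order.index(x[:1]); index? never fails on the filtered elements, .getD 0 is unreachable
def pvKeyA (x : String) : Nat := (PySem.List.index? desired_order (pvHead1 x)).getD 0

def sort_lst_by_char1 (lst : List String) : List String :=
  let opts1 := PySem.List.sorted
    (lst.filter (fun op => desired_order.contains (pvHead1 op))) pvKeyA
  if opts1.length = 6 then opts1 else []

-- ===== PORT B =====
-- inner loop of B: scan lst in original order, keep ops whose first character is c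
def pvBucket (lst : List String) (c : Char) : List String :=
  lst.filter (fun op => pvHead1 op == [c])

def sort_lst_by_char1_alt (lst : List String) : List String :=
  let out := (['A', 'B', 'C', 'D', 'E', 'F'] : List Char).foldl
    (fun acc c => acc ++ pvBucket lst c) []
  if out.length = 6 then out else []

-- ===== PRECONDITION & SPEC =====
def Spec_sort_lst_by_char1 (lst : List String) (out : List String) : Prop := out = sort_lst_by_char1_alt lst
instance (lst : List String) (out : List String) : Decidable (Spec_sort_lst_by_char1 lst out) := by unfold Spec_sort_lst_by_char1; infer_instance

-- ===== CLAIM (what is proved, stated in full; the proofs are below) =====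
def Claim_equal_sort_lst_by_char1 : Prop := ∀ (lst : List String), Dom_sort_lst_by_char1 lst → Spec_sort_lst_by_char1 lst (sort_lst_by_char1 lst)

-- ===== LEMMAS AND PROOFS =====

-- elements of a bucket have that first character
lemma head_mem_bucket {l : List String} {c : Char} {y : String}
    (h : y ∈ pvBucket l c) : pvHead1 y = [c] := by
  simp [pvBucket, List.mem_filter] at h
  exact h.2

lemma pvKeyA_of_head {y : String} {c : Char} (h : pvHead1 y = [c]) :
    pvKeyA y = (PySem.List.index? desired_order [c]).getD 0 := by
  simp [pvKeyA, h]

lemma key_of_bucket {l : List String} {c : Char} {y : String} (h : y ∈ pvBucket l c) :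
    pvKeyA y = (PySem.List.index? desired_order [c]).getD 0 :=
  pvKeyA_of_head (head_mem_bucket h)

-- stable insertion of x into a key-sorted concatenation: past the ≤-prefix, before the >-suffix
lemma insert_step (x : String) (L R : List String)
    (hL : ∀ y ∈ L, ¬ pvKeyA x < pvKeyA y) (hR : ∀ y ∈ R, pvKeyA x < pvKeyA y) :
    PySem.List.insertBy (fun a b => decide (pvKeyA a < pvKeyA b)) x (L ++ R) = L ++ x :: R := by
  induction L with
  | nil =>
    cases R with
    | nil => simp [PySem.List.insertBy]
    | cons r rs =>
      have := hR r (by simp)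
      simp [PySem.List.insertBy, this]
  | cons a L ih =>
    have ha : ¬ pvKeyA x < pvKeyA a := hL a (by simp)
    simp only [List.cons_append, PySem.List.insertBy, decide_eq_true_eq, if_neg ha]
    simp [ih (fun y hy => hL y (by simp [hy]))]

lemma bucket_append (l : List String) (x : String) (c : Char) :
    pvBucket (l ++ [x]) c = pvBucket l c ++ (if pvHead1 x = [c] then [x] else []) := by
  simp [pvBucket, List.filter_append, List.filter_singleton]

-- A's sorted filtered list equals B's six buckets, concatenated in priority order
lemma sorted_eq_buckets (lst : List String) :
    PySem.List.sorted (lst.filter (fun op => desired_order.contains (pvHead1 op))) pvKeyA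
      = pvBucket lst 'A' ++ (pvBucket lst 'B' ++ (pvBucket lst 'C' ++
        (pvBucket lst 'D' ++ (pvBucket lst 'E' ++ pvBucket lst 'F')))) := by
  induction lst using List.reverseRecOn with
  | nil => simp [pvBucket, PySem.List.sorted]
  | append_singleton l x ih =>
    by_cases hp : desired_order.contains (pvHead1 x)
    · -- x passes A's filter: it lands in exactly one bucket
      have hd : decide (pvHead1 x ∈ desired_order) = true := by simpa using hp
      have hsort : PySem.List.sorted ((l ++ [x]).filter (fun op => desired_order.contains (pvHead1 op))) pvKeyA
          = PySem.List.insertBy (fun a b => decide (pvKeyA a < pvKeyA b)) x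
              (PySem.List.sorted (l.filter (fun op => desired_order.contains (pvHead1 op))) pvKeyA) := by
        rw [PySem.List.sorted_eq_foldl_insertBy, PySem.List.sorted_eq_foldl_insertBy,
            List.filter_append, List.foldl_append]
        simp [List.filter, hd]
      rw [hsort, ih, bucket_append, bucket_append, bucket_append, bucket_append,
          bucket_append, bucket_append]
      have hmem : pvHead1 x ∈ desired_order := by simpa using hp
      simp only [desired_order, List.mem_cons, List.not_mem_nil, or_false] at hmem
      rcases hmem with hc | hc | hc | hc | hc | hc
      · -- x's first char is 'A'
        rw [insert_step x (pvBucket l 'A') (pvBucket l 'B' ++ (pvBucket l 'C' ++ (pvBucket l 'D' ++ (pvBucket l 'E' ++ (pvBucket l 'F')))))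
          (by
            intro y hy
            rw [pvKeyA_of_head hc, key_of_bucket hy]
            decide)
          (by
            intro y hy
            simp only [List.mem_append] at hy
            rw [pvKeyA_of_head hc]
            rcases hy with h|h|h|h|h <;> rw [key_of_bucket h] <;> decide)]
        simp [hc]

      · -- x's first char is 'B'
        have hsplit : pvBucket l 'A' ++ (pvBucket l 'B' ++ (pvBucket l 'C' ++ (pvBucket l 'D' ++ (pvBucket l 'E' ++ (pvBucket l 'F')))))
            = (pvBucket l 'A' ++ (pvBucket l 'B')) ++ (pvBucket l 'C' ++ (pvBucket l 'D' ++ (pvBucket l 'E' ++ (pvBucket l 'F')))) := by simp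
        rw [hsplit]
        rw [insert_step x (pvBucket l 'A' ++ (pvBucket l 'B')) (pvBucket l 'C' ++ (pvBucket l 'D' ++ (pvBucket l 'E' ++ (pvBucket l 'F'))))
          (by
            intro y hy
            simp only [List.mem_append] at hy
            rw [pvKeyA_of_head hc]
            rcases hy with h|h <;> rw [key_of_bucket h] <;> decide)
          (by
            intro y hy
            simp only [List.mem_append] at hy
            rw [pvKeyA_of_head hc]
            rcases hy with h|h|h|h <;> rw [key_of_bucket h] <;> decide)]
        simp [hc]

      · -- x's first char is 'C'
        have hsplit : pvBucket l 'A' ++ (pvBucket l 'B' ++ (pvBucket l 'C' ++ (pvBucket l 'D' ++ (pvBucket l 'E' ++ (pvBucket l 'F')))))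
            = (pvBucket l 'A' ++ (pvBucket l 'B' ++ (pvBucket l 'C'))) ++ (pvBucket l 'D' ++ (pvBucket l 'E' ++ (pvBucket l 'F'))) := by simp
        rw [hsplit]
        rw [insert_step x (pvBucket l 'A' ++ (pvBucket l 'B' ++ (pvBucket l 'C'))) (pvBucket l 'D' ++ (pvBucket l 'E' ++ (pvBucket l 'F')))
          (by
            intro y hy
            simp only [List.mem_append] at hy
            rw [pvKeyA_of_head hc]
            rcases hy with h|h|h <;> rw [key_of_bucket h] <;> decide)
          (by
            intro y hy
            simp only [List.mem_append] at hy
            rw [pvKeyA_of_head hc]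
            rcases hy with h|h|h <;> rw [key_of_bucket h] <;> decide)]
        simp [hc]

      · -- x's first char is 'D'
        have hsplit : pvBucket l 'A' ++ (pvBucket l 'B' ++ (pvBucket l 'C' ++ (pvBucket l 'D' ++ (pvBucket l 'E' ++ (pvBucket l 'F')))))
            = (pvBucket l 'A' ++ (pvBucket l 'B' ++ (pvBucket l 'C' ++ (pvBucket l 'D')))) ++ (pvBucket l 'E' ++ (pvBucket l 'F')) := by simp
        rw [hsplit]
        rw [insert_step x (pvBucket l 'A' ++ (pvBucket l 'B' ++ (pvBucket l 'C' ++ (pvBucket l 'D')))) (pvBucket l 'E' ++ (pvBucket l 'F'))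
          (by
            intro y hy
            simp only [List.mem_append] at hy
            rw [pvKeyA_of_head hc]
            rcases hy with h|h|h|h <;> rw [key_of_bucket h] <;> decide)
          (by
            intro y hy
            simp only [List.mem_append] at hy
            rw [pvKeyA_of_head hc]
            rcases hy with h|h <;> rw [key_of_bucket h] <;> decide)]
        simp [hc]

      · -- x's first char is 'E'
        have hsplit : pvBucket l 'A' ++ (pvBucket l 'B' ++ (pvBucket l 'C' ++ (pvBucket l 'D' ++ (pvBucket l 'E' ++ (pvBucket l 'F')))))
            = (pvBucket l 'A' ++ (pvBucket l 'B' ++ (pvBucket l 'C' ++ (pvBucket l 'D' ++ (pvBucket l 'E'))))) ++ (pvBucket l 'F') := by simp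
        rw [hsplit]
        rw [insert_step x (pvBucket l 'A' ++ (pvBucket l 'B' ++ (pvBucket l 'C' ++ (pvBucket l 'D' ++ (pvBucket l 'E'))))) (pvBucket l 'F')
          (by
            intro y hy
            simp only [List.mem_append] at hy
            rw [pvKeyA_of_head hc]
            rcases hy with h|h|h|h|h <;> rw [key_of_bucket h] <;> decide)
          (by
            intro y hy
            rw [pvKeyA_of_head hc, key_of_bucket hy]
            decide)]
        simp [hc]

      · -- x's first char is 'F'
        have hsplit : pvBucket l 'A' ++ (pvBucket l 'B' ++ (pvBucket l 'C' ++ (pvBucket l 'D' ++ (pvBucket l 'E' ++ (pvBucket l 'F')))))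
            = (pvBucket l 'A' ++ (pvBucket l 'B' ++ (pvBucket l 'C' ++ (pvBucket l 'D' ++ (pvBucket l 'E' ++ (pvBucket l 'F')))))) ++ ([] : List String) := by simp
        rw [hsplit]
        rw [insert_step x (pvBucket l 'A' ++ (pvBucket l 'B' ++ (pvBucket l 'C' ++ (pvBucket l 'D' ++ (pvBucket l 'E' ++ (pvBucket l 'F')))))) ([] : List String)
          (by
            intro y hy
            simp only [List.mem_append] at hy
            rw [pvKeyA_of_head hc]
            rcases hy with h|h|h|h|h|h <;> rw [key_of_bucket h] <;> decide)
          (by intro y hy; simp at hy)]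
        simp [hc]
    · -- x fails A's filter: nothing changes
      have hd : decide (pvHead1 x ∈ desired_order) = false := by simpa using hp
      have hsort : PySem.List.sorted ((l ++ [x]).filter (fun op => desired_order.contains (pvHead1 op))) pvKeyA
          = PySem.List.sorted (l.filter (fun op => desired_order.contains (pvHead1 op))) pvKeyA := by
        rw [List.filter_append]
        simp [List.filter, hd]
      have hnotc : ∀ c : Char, c ∈ (['A','B','C','D','E','F'] : List Char) → ¬ pvHead1 x = [c] := by
        intro c hcmem hceq
        have : pvHead1 x ∈ desired_order := by
          simp only [desired_order]
          fin_cases hcmem <;> simp [hceq]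
        simp [this] at hd
      rw [hsort, ih, bucket_append, bucket_append, bucket_append, bucket_append,
          bucket_append, bucket_append]
      simp [hnotc 'A' (by decide), hnotc 'B' (by decide), hnotc 'C' (by decide),
            hnotc 'D' (by decide), hnotc 'E' (by decide), hnotc 'F' (by decide)]

-- ===== VERDICT (by name: the statement is the Claim_ definition above) =====
theorem sort_lst_by_char1_spec : Claim_equal_sort_lst_by_char1 := by
  intro lst _
  unfold Spec_sort_lst_by_char1 sort_lst_by_char1 sort_lst_by_char1_alt
  rw [sorted_eq_buckets]
  simp [List.foldl, List.append_assoc]
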